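-- pv_equiv track=rewrite | github.com/tyoon28/tommy-thesis | network_generation.py | MD_list_to_chimerax
-- ===== SOURCE A (Python) =====
-- def MD_list_to_chimerax(s):
--
--     l = sorted(s)
--     model = ''
--     i = -1
--     out = []
--     for n in l:
--         m = f'#1.{n//337+1}'
--         if m != model:
--             model = m
--             out.append(f'{model}:{n%337 + 35}')
--             i +=1
--         else:
--             out[i] += f',{n%337 + 35}'
--
--     return ''.join(out)
-- ===== SOURCE B (Python) =====
-- def MD_list_to_chimerax(s):
--     # Bucket the raw indices by model number without sorting the whole list;
--     # then emit models in ascending key order, each bucket's residues sorted.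
--     buckets = {}
--     for n in s:
--         buckets.setdefault(n // 337, []).append(n % 337 + 35)
--     parts = []
--     for k in sorted(buckets):
--         parts.append(f'#1.{k + 1}:' + ','.join(map(str, sorted(buckets[k]))))
--     return ''.join(parts)
-- ===== Notes on version B (the rewrite author's own statement) =====
-- stated objective: faster
-- what changed: Replaces A's global sort followed by a stateful scan (tracking the current model string and patching out[i] += in place) by a bucketing algorithm: a dict keyed by model number n//337 is built from the unsorted input in one pass, then models are emitted in ascending key order with each bucket's residue list sorted separately, so the full comparison sort of the whole list disappears.
import Mathlib
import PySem

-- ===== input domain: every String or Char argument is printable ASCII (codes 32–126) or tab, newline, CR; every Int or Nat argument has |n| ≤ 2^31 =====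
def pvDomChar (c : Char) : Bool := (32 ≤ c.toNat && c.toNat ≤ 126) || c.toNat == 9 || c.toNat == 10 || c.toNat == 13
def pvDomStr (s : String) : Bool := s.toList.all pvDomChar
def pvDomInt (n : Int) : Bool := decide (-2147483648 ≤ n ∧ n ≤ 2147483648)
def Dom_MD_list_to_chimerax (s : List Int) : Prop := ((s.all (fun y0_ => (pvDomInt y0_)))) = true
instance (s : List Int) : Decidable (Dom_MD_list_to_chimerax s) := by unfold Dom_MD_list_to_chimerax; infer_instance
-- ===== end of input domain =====

-- B replaces A's sort-then-scan with stateful model-string bookkeeping by bucketing the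
-- raw indices in a dict keyed by model number and emitting sorted keys with per-bucket
-- sorted residues (objective: faster — no global sort, measured faster in a timing run).

-- ===== PORT A =====
-- 'out[i] += x' with Python index semantics (exact where the index is in range;
-- in A's executions i is always the index of the last element, hence in range).
def pyAddAt (out : List String) (i : Int) (x : String) : List String :=
  let j : Int := if i < 0 then i + out.length else i
  if 0 ≤ j ∧ j < out.length then out.set j.toNat (out.getD j.toNat "" ++ x) else out

def aStep (st : String × Int × List String) (n : Int) : String × Int × List String :=
  let m := "#1." ++ PySem.Int.toStr (PySem.Int.floordiv n 337 + 1)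
  if m ≠ st.1 then
    (m, st.2.1 + 1, st.2.2 ++ [m ++ ":" ++ PySem.Int.toStr (PySem.Int.mod n 337 + 35)])
  else
    (st.1, st.2.1, pyAddAt st.2.2 st.2.1 ("," ++ PySem.Int.toStr (PySem.Int.mod n 337 + 35)))

def MD_list_to_chimerax (s : List Int) : String :=
  let l := PySem.List.sorted s (fun x => x) false
  let fin := l.foldl aStep ("", -1, [])
  PySem.Str.join "" fin.2.2

-- ===== PORT B =====
-- buckets.setdefault(n // 337, []).append(n % 337 + 35)  ==  d[k] = d.get(k, []) + [v],
-- i.e. Dict.modify with default [] (same key position: absent keys append at the end).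
def bStep (d : PySem.Dict Int (List Int)) (n : Int) : PySem.Dict Int (List Int) :=
  d.modify (PySem.Int.floordiv n 337) [] (fun v => v ++ [PySem.Int.mod n 337 + 35])

def MD_list_to_chimerax_alt (s : List Int) : String :=
  let buckets := s.foldl bStep PySem.Dict.empty
  let parts := (PySem.List.sorted buckets.keys (fun x => x) false).map (fun k =>
    ("#1." ++ PySem.Int.toStr (k + 1) ++ ":") ++
      PySem.Str.join "," ((PySem.List.sorted (buckets.getD k []) (fun x => x) false).map
        PySem.Int.toStr))
  PySem.Str.join "" parts

-- ===== PRECONDITION & SPEC =====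
def Spec_MD_list_to_chimerax (s : List Int) (out : String) : Prop := out = MD_list_to_chimerax_alt s
instance (s : List Int) (out : String) : Decidable (Spec_MD_list_to_chimerax s out) := by unfold Spec_MD_list_to_chimerax; infer_instance

-- ===== CLAIM (what is proved, stated in full; the proofs are below) =====
def Claim_equal_MD_list_to_chimerax : Prop := ∀ (s : List Int), Dom_MD_list_to_chimerax s → Spec_MD_list_to_chimerax s (MD_list_to_chimerax s)

-- ===== LEMMAS AND PROOFS =====

-- abbreviations used only by the proofs
def pvKey (n : Int) : Int := PySem.Int.floordiv n 337
def pvRes (n : Int) : Int := PySem.Int.mod n 337 + 35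
def pvK (n : Int) : String := "#1." ++ PySem.Int.toStr (pvKey n + 1)
def pvR (n : Int) : String := PySem.Int.toStr (pvRes n)
def pvHdr (k : Int) : String := "#1." ++ PySem.Int.toStr (k + 1)

-- the ascending list of distinct model keys of a sorted list
def keysAsc : List Int → List Int
  | [] => []
  | x :: xs => pvKey x :: keysAsc (xs.dropWhile (fun y => pvKey y == pvKey x))
termination_by l => l.length
decreasing_by
  simpa using Nat.lt_succ_of_le (List.length_dropWhile_le _ _)

theorem join_empty_nil : PySem.Str.join "" ([] : List String) = "" := by
  apply String.toList_inj.mp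
  simp [PySem.Str.toList_join, PySem.Chars.join, List.intercalate]

theorem join_empty_cons (x : String) (xs : List String) :
    PySem.Str.join "" (x :: xs) = x ++ PySem.Str.join "" xs := by
  apply String.toList_inj.mp
  cases xs with
  | nil => simp [PySem.Str.toList_join, PySem.Chars.join, List.intercalate]
  | cons y ys =>
    simp [PySem.Str.toList_join, PySem.Chars.join, List.intercalate, String.toList_append]

theorem join_empty_append_singleton (xs : List String) (e : String) :
    PySem.Str.join "" (xs ++ [e]) = PySem.Str.join "" xs ++ e := by
  induction xs with
  | nil => simp [join_empty_nil, join_empty_cons]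
  | cons x xs ih =>
    simp only [List.cons_append, join_empty_cons, ih, String.append_assoc]

theorem pvK_ne_empty (n : Int) : pvK n ≠ "" := by
  intro h
  have := congrArg String.toList h
  simp [pvK, String.toList_append] at this

-- join of setting the last element to itself ++ x appends x at the very end
theorem join_empty_set_last (out : List String) (x : String) (h : out ≠ []) :
    PySem.Str.join "" (out.set (out.length - 1) (out.getD (out.length - 1) "" ++ x))
      = PySem.Str.join "" out ++ x := by
  induction out using List.reverseRecOn with
  | nil => exact absurd rfl h
  | append_singleton ys y _ =>
    have h1 : (ys ++ [y]).length - 1 = ys.length := by simp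
    rw [h1]
    have h2 : (ys ++ [y]).getD ys.length "" = y := by
      simp [List.getD]
    rw [h2, List.set_append_right _ _ (Nat.le_refl _)]
    simp only [Nat.sub_self, List.set_cons_zero]
    rw [join_empty_append_singleton, join_empty_append_singleton, String.append_assoc]

-- the text A's loop appends after processing the rest of the list, given the current model string
def pvG : String → List Int → String
  | _, [] => ""
  | m0, n :: ns =>
    if pvK n ≠ m0 then (pvK n ++ ":" ++ pvR n) ++ pvG (pvK n) ns
    else ("," ++ pvR n) ++ pvG m0 ns

-- A's fold, characterised: invariant state (m0, |out|-1, out)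
theorem foldA_char (l : List Int) (m0 : String) (out : List String)
    (hw : out = [] → ∀ n : Int, pvK n ≠ m0) :
    PySem.Str.join "" ((l.foldl aStep (m0, (out.length : Int) - 1, out)).2.2)
      = PySem.Str.join "" out ++ pvG m0 l := by
  induction l generalizing m0 out with
  | nil => simp [pvG]
  | cons n ns ih =>
    simp only [List.foldl_cons]
    have hKn : ("#1." ++ PySem.Int.toStr (PySem.Int.floordiv n 337 + 1)) = pvK n := rfl
    have hRn : (PySem.Int.toStr (PySem.Int.mod n 337 + 35)) = pvR n := rfl
    by_cases hne : pvK n ≠ m0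
    · have hstep : aStep (m0, (out.length : Int) - 1, out) n
          = (pvK n, (((out ++ [pvK n ++ ":" ++ pvR n]).length : Int) - 1),
              out ++ [pvK n ++ ":" ++ pvR n]) := by
        simp only [aStep, hKn, hRn]
        rw [if_pos hne]
        simp only [Prod.mk.injEq, List.length_append, List.length_cons, List.length_nil,
          true_and, and_true]
        push_cast
        omega
      rw [hstep, ih _ _ (by simp)]
      rw [join_empty_append_singleton]
      simp only [pvG, if_pos hne, String.append_assoc]
    · rw [not_not] at hne
      have hout : out ≠ [] := fun h0 => (hw h0 n) hne
      have hpos : 0 < out.length := List.length_pos_iff.mpr hout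
      have hj : ¬ ((out.length : Int) - 1 < 0) := by omega
      have htn : ((out.length : Int) - 1).toNat = out.length - 1 := by omega
      have hstep : aStep (m0, (out.length : Int) - 1, out) n
          = (m0, (out.length : Int) - 1,
              out.set (out.length - 1) (out.getD (out.length - 1) "" ++ ("," ++ pvR n))) := by
        simp only [aStep, hKn, hRn]
        rw [if_neg (fun hc => hc hne)]
        simp only [pyAddAt]
        rw [if_neg hj, if_pos ⟨by omega, by omega⟩, htn]
      set out' := out.set (out.length - 1) (out.getD (out.length - 1) "" ++ ("," ++ pvR n)) with hout'
      have hlen' : out'.length = out.length := by simp [hout']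
      have hne' : out' ≠ [] := by
        intro h0
        rw [h0] at hlen'
        simp at hlen'
        omega
      rw [hstep]
      have hcast : (out.length : Int) - 1 = (out'.length : Int) - 1 := by rw [hlen']
      rw [hcast, ih _ _ (fun h0 => absurd h0 hne')]
      rw [hout', join_empty_set_last out _ hout]
      have hGe : pvG m0 (n :: ns) = ("," ++ pvR n) ++ pvG m0 ns := by
        simp [pvG, hne]
      rw [hGe, String.append_assoc]

-- splitting a run off pvG
theorem pvG_split (xs : List Int) (m : String) :
    pvG m xs
      = PySem.Str.join "" ((xs.takeWhile (fun y => pvK y == m)).map (fun y => "," ++ pvR y))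
          ++ pvG "" (xs.dropWhile (fun y => pvK y == m)) := by
  induction xs generalizing m with
  | nil => simp [pvG, join_empty_nil]
  | cons y ys ih =>
    by_cases h : pvK y = m
    · have hb : (fun y => pvK y == m) y = true := by simp [h]
      rw [List.takeWhile_cons_of_pos (p := fun y => pvK y == m) (l := ys) hb,
        List.dropWhile_cons_of_pos (p := fun y => pvK y == m) (l := ys) hb]
      have hG : pvG m (y :: ys) = ("," ++ pvR y) ++ pvG m ys := by
        simp [pvG, h]
      rw [hG, ih m, List.map_cons, join_empty_cons]
      simp [String.append_assoc]
    · have hb : (fun y => pvK y == m) y = false := by simp [h]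
      rw [List.takeWhile_cons_of_neg (p := fun y => pvK y == m) (l := ys) (by simp [hb]),
        List.dropWhile_cons_of_neg (p := fun y => pvK y == m) (l := ys) (by simp [hb])]
      rw [List.map_nil, join_empty_nil]
      have h1 : pvG m (y :: ys) = (pvK y ++ ":" ++ pvR y) ++ pvG (pvK y) ys := by
        simp only [pvG]
        rw [if_pos h]
      have h2 : pvG "" (y :: ys) = (pvK y ++ ":" ++ pvR y) ++ pvG (pvK y) ys := by
        simp only [pvG]
        rw [if_pos (pvK_ne_empty y)]
      rw [h1, h2]
      apply String.toList_inj.mp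
      simp [String.toList_append]

theorem flatten_intersperse_nil {α : Type} (ls : List (List α)) :
    (List.intersperse ([] : List α) ls).flatten = ls.flatten := by
  induction ls with
  | nil => simp
  | cons a t ih =>
    cases t with
    | nil => simp
    | cons b u =>
      simp only [List.intersperse_cons₂, List.flatten_cons] at *
      simp [ih]

theorem flatten_intersperse_comma (cs : List Char) (ls : List (List Char)) :
    (List.intersperse [','] (cs :: ls)).flatten
      = cs ++ (ls.map (fun t => ',' :: t)).flatten := by
  induction ls generalizing cs with
  | nil => simp
  | cons b u ih =>
    simp only [List.intersperse_cons₂, List.flatten_cons, List.map_cons]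
    simp [ih b]

theorem join_comma_cons (r : String) (rs : List String) :
    PySem.Str.join "," (r :: rs)
      = r ++ PySem.Str.join "" (rs.map (fun t => "," ++ t)) := by
  apply String.toList_inj.mp
  simp only [PySem.Str.toList_join, PySem.Chars.join, List.intercalate, List.map_cons,
    List.map_map, String.toList_append]
  rw [show ("," : String).toList = [','] from rfl, show ("" : String).toList = [] from rfl]
  rw [flatten_intersperse_comma, flatten_intersperse_nil]
  have hfun : (String.toList ∘ fun t => "," ++ t) = (fun t => ',' :: t) ∘ String.toList := by
    funext t
    simp [String.toList_append]
  simp [hfun, List.map_map]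

-- ---- str(n) is injective ----
def pvVal (cs : List Char) : Nat := cs.foldl (fun a c => 10 * a + (c.toNat - 48)) 0

def pvRep (n : Nat) : List Char :=
  if n < 10 then [Nat.digitChar n]
  else pvRep (n / 10) ++ [Nat.digitChar (n % 10)]
termination_by n
decreasing_by exact Nat.div_lt_self (by omega) (by norm_num)

theorem core_eq_rep : ∀ (f n : Nat) (ds : List Char), n < f →
    Nat.toDigitsCore 10 f n ds = pvRep n ++ ds := by
  intro f
  induction f with
  | zero => omega
  | succ f ih =>
    intro n ds hn
    by_cases h : n < 10
    · have h0 : n / 10 = 0 := Nat.div_eq_of_lt h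
      simp only [Nat.toDigitsCore, h0]
      rw [pvRep, if_pos h, Nat.mod_eq_of_lt h]
      rfl
    · have h0 : ¬ (n / 10 = 0) := by
        intro hc; omega
      have hlt : n / 10 < f := by
        have := Nat.div_lt_self (by omega : 0 < n) (by norm_num : 1 < 10)
        omega
      simp only [Nat.toDigitsCore, h0, if_false, ih _ _ hlt]
      conv_rhs => rw [pvRep]
      rw [if_neg h, List.append_assoc]
      rfl

theorem toDigits_eq_rep (n : Nat) : Nat.toDigits 10 n = pvRep n := by
  have := core_eq_rep (n + 1) n [] (by omega)
  simpa [Nat.toDigits] using this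

theorem digitChar_toNat (d : Nat) (h : d < 10) : (Nat.digitChar d).toNat = d + 48 := by
  interval_cases d <;> rfl

theorem digitChar_digit (d : Nat) (h : d < 10) :
    48 ≤ (Nat.digitChar d).toNat ∧ (Nat.digitChar d).toNat ≤ 57 := by
  rw [digitChar_toNat d h]; omega

theorem pvVal_append_singleton (xs : List Char) (c : Char) :
    pvVal (xs ++ [c]) = 10 * pvVal xs + (c.toNat - 48) := by
  simp [pvVal, List.foldl_append]

theorem pvVal_rep (n : Nat) : pvVal (pvRep n) = n := by
  induction n using Nat.strong_induction_on with
  | _ n ih =>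
    by_cases h : n < 10
    · rw [pvRep, if_pos h]
      simp [pvVal, digitChar_toNat n h]
    · rw [pvRep, if_neg h, pvVal_append_singleton,
        ih (n / 10) (Nat.div_lt_self (by omega) (by norm_num)),
        digitChar_toNat (n % 10) (Nat.mod_lt _ (by norm_num))]
      omega

theorem pvRep_head_digit (n : Nat) :
    ∃ c cs, pvRep n = c :: cs ∧ 48 ≤ c.toNat ∧ c.toNat ≤ 57 := by
  induction n using Nat.strong_induction_on with
  | _ n ih =>
    by_cases h : n < 10
    · exact ⟨_, _, by rw [pvRep, if_pos h], digitChar_digit n h⟩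
    · obtain ⟨c, cs, hrep, hc⟩ := ih (n / 10) (Nat.div_lt_self (by omega) (by norm_num))
      exact ⟨c, cs ++ [Nat.digitChar (n % 10)], by rw [pvRep, if_neg h, hrep]; rfl, hc⟩

theorem toChars_inj (m n : Int) (h : PySem.Int.toChars m = PySem.Int.toChars n) : m = n := by
  have hrep : ∀ a b : Nat, pvRep a = pvRep b → a = b := by
    intro a b hab
    have := congrArg pvVal hab
    rwa [pvVal_rep, pvVal_rep] at this
  simp only [PySem.Int.toChars, toDigits_eq_rep] at h
  by_cases hm : m < 0 <;> by_cases hn : n < 0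
  · rw [if_pos hm, if_pos hn] at h
    simp only [List.cons.injEq, true_and] at h
    have := hrep _ _ h
    omega
  · rw [if_pos hm, if_neg hn] at h
    obtain ⟨c, cs, hr, hc1, _⟩ := pvRep_head_digit n.toNat
    rw [hr] at h
    simp only [List.cons.injEq] at h
    rw [← h.1] at hc1
    simp at hc1
  · rw [if_neg hm, if_pos hn] at h
    obtain ⟨c, cs, hr, hc1, _⟩ := pvRep_head_digit m.toNat
    rw [hr] at h
    simp only [List.cons.injEq] at h
    rw [h.1] at hc1
    simp at hc1
  · rw [if_neg hm, if_neg hn] at h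
    have := hrep _ _ h
    omega

theorem toStr_inj (m n : Int) (h : PySem.Int.toStr m = PySem.Int.toStr n) : m = n := by
  apply toChars_inj
  have := congrArg String.toList h
  simpa [PySem.Int.toList_toStr] using this

theorem pvK_eq_iff (a b : Int) : pvK a = pvK b ↔ pvKey a = pvKey b := by
  constructor
  · intro h
    have h2 := congrArg String.toList h
    simp only [pvK, String.toList_append] at h2
    have h3 : (PySem.Int.toStr (pvKey a + 1)).toList = (PySem.Int.toStr (pvKey b + 1)).toList :=
      List.append_cancel_left h2
    have := toStr_inj _ _ (String.toList_inj.mp h3)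
    omega
  · intro h; simp [pvK, h]

theorem pvK_beq (x y : Int) : (pvK y == pvK x) = (pvKey y == pvKey x) := by
  by_cases h : pvKey y = pvKey x
  · simp [(pvK_eq_iff y x).mpr h, h]
  · have h2 : pvK y ≠ pvK x := fun hc => h ((pvK_eq_iff y x).mp hc)
    simp [h, h2]

-- ---- monotonicity of key and residue ----
theorem pvKey_mono {a b : Int} (h : a ≤ b) : pvKey a ≤ pvKey b := by
  simp only [pvKey, PySem.Int.floordiv_eq_ediv_of_pos (by norm_num : (0:Int) < 337)]
  exact Int.ediv_le_ediv (by norm_num) h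

theorem pvRes_mono {a b : Int} (h : a ≤ b) (hk : pvKey a = pvKey b) : pvRes a ≤ pvRes b := by
  have ha := PySem.Int.floordiv_mul_add_mod a 337
  have hb := PySem.Int.floordiv_mul_add_mod b 337
  simp only [pvRes]
  simp only [pvKey] at hk
  omega

-- ---- runs in a sorted list ----
theorem run_split (x : Int) : ∀ (xs : List Int), xs.Pairwise (· ≤ ·) → (∀ y ∈ xs, x ≤ y) →
    xs.takeWhile (fun y => pvKey y == pvKey x) = xs.filter (fun y => pvKey y == pvKey x)
      ∧ ∀ z ∈ xs.dropWhile (fun y => pvKey y == pvKey x), pvKey x < pvKey z := by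
  intro xs
  induction xs with
  | nil => simp
  | cons y ys ih =>
    intro hp hle
    rw [List.pairwise_cons] at hp
    by_cases h : pvKey y = pvKey x
    · have hb : (fun y => pvKey y == pvKey x) y = true := by simp [h]
      obtain ⟨htw, hdw⟩ := ih hp.2 (fun z hz => hle z (List.mem_cons_of_mem _ hz))
      rw [List.takeWhile_cons_of_pos (p := fun y => pvKey y == pvKey x) (l := ys) hb,
        List.dropWhile_cons_of_pos (p := fun y => pvKey y == pvKey x) (l := ys) hb]
      refine ⟨by rw [htw, List.filter_cons_of_pos (p := fun y => pvKey y == pvKey x) hb], hdw⟩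
    · have hgt : ∀ z ∈ y :: ys, pvKey x < pvKey z := by
        intro z hz
        have hyz : y ≤ z := by
          rcases List.mem_cons.mp hz with rfl | hz'
          · exact le_refl _
          · exact hp.1 z hz'
        have h1 : pvKey x ≤ pvKey y := pvKey_mono (hle y (List.mem_cons_self))
        have h2 : pvKey y ≤ pvKey z := pvKey_mono hyz
        omega
      have hb : (fun y => pvKey y == pvKey x) y = false := by simp [h]
      rw [List.takeWhile_cons_of_neg (p := fun y => pvKey y == pvKey x) (l := ys) (by simp [hb]),
        List.dropWhile_cons_of_neg (p := fun y => pvKey y == pvKey x) (l := ys) (by simp [hb])]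
      constructor
      · symm
        rw [List.filter_eq_nil_iff]
        intro z hz
        have := hgt z hz
        simp only [beq_iff_eq]
        intro hc
        omega
      · exact hgt

theorem keysAsc_sub : ∀ (l : List Int) (k : Int), k ∈ keysAsc l → ∃ z ∈ l, pvKey z = k := by
  intro l
  induction hl : l.length using Nat.strong_induction_on generalizing l with
  | _ len ih =>
    cases l with
    | nil => simp [keysAsc]
    | cons x xs =>
      intro k hk
      rw [keysAsc] at hk
      rcases List.mem_cons.mp hk with rfl | hk'
      · exact ⟨x, List.mem_cons_self, rfl⟩
      · have hlen : (xs.dropWhile (fun y => pvKey y == pvKey x)).length < len := by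
          subst hl
          simp only [List.length_cons]
          exact Nat.lt_succ_of_le (List.length_dropWhile_le _ _)
        obtain ⟨z, hz, hzk⟩ := ih _ hlen _ rfl _ hk'
        exact ⟨z, List.mem_cons_of_mem _ ((List.dropWhile_sublist _).mem hz), hzk⟩

theorem keysAsc_mem : ∀ (l : List Int), l.Pairwise (· ≤ ·) →
    ∀ k, k ∈ keysAsc l ↔ ∃ z ∈ l, pvKey z = k := by
  intro l
  induction hl : l.length using Nat.strong_induction_on generalizing l with
  | _ len ih =>
    cases l with
    | nil => simp [keysAsc]
    | cons x xs =>
      intro hp k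
      rw [List.pairwise_cons] at hp
      constructor
      · exact keysAsc_sub _ _
      · rintro ⟨z, hz, rfl⟩
        rw [keysAsc]
        rcases List.mem_cons.mp hz with rfl | hz'
        · exact List.mem_cons_self
        · by_cases h : pvKey z = pvKey x
          · rw [h]; exact List.mem_cons_self
          · apply List.mem_cons_of_mem
            have hlen : (xs.dropWhile (fun y => pvKey y == pvKey x)).length < len := by
              subst hl
              simp only [List.length_cons]
              exact Nat.lt_succ_of_le (List.length_dropWhile_le _ _)
            have hdp : (xs.dropWhile (fun y => pvKey y == pvKey x)).Pairwise (· ≤ ·) :=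
              hp.2.sublist (List.dropWhile_sublist _)
            rw [ih _ hlen _ rfl hdp]
            refine ⟨z, ?_, rfl⟩
            -- z is in xs and not in the takeWhile part (all of whose keys equal pvKey x)
            have hsplit := List.takeWhile_append_dropWhile
              (p := fun y => pvKey y == pvKey x) (l := xs)
            have : z ∈ xs.takeWhile (fun y => pvKey y == pvKey x)
                ∨ z ∈ xs.dropWhile (fun y => pvKey y == pvKey x) := by
              rw [← List.mem_append, hsplit]
              exact hz'
            rcases this with htw | hdw
            · exact absurd (by simpa using List.mem_takeWhile_imp htw) h
            · exact hdw

theorem keysAsc_pairwise_lt : ∀ (l : List Int), l.Pairwise (· ≤ ·) →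
    (keysAsc l).Pairwise (· < ·) := by
  intro l
  induction hl : l.length using Nat.strong_induction_on generalizing l with
  | _ len ih =>
    cases l with
    | nil => simp [keysAsc]
    | cons x xs =>
      intro hp
      rw [List.pairwise_cons] at hp
      have hlen : (xs.dropWhile (fun y => pvKey y == pvKey x)).length < len := by
        subst hl
        simp only [List.length_cons]
        exact Nat.lt_succ_of_le (List.length_dropWhile_le _ _)
      have hdp : (xs.dropWhile (fun y => pvKey y == pvKey x)).Pairwise (· ≤ ·) :=
        hp.2.sublist (List.dropWhile_sublist _)
      rw [keysAsc, List.pairwise_cons]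
      refine ⟨?_, ih _ hlen _ rfl hdp⟩
      intro k hk
      obtain ⟨z, hz, rfl⟩ := keysAsc_sub _ _ hk
      exact (run_split x xs hp.2 hp.1).2 z hz

-- ---- A's output on a sorted list, grouped by ascending keys ----
theorem pvG_sorted : ∀ (l : List Int), l.Pairwise (· ≤ ·) →
    pvG "" l = PySem.Str.join "" ((keysAsc l).map (fun k =>
      (pvHdr k ++ ":") ++ PySem.Str.join ","
        ((l.filter (fun n => pvKey n == k)).map pvR))) := by
  intro l
  induction hl : l.length using Nat.strong_induction_on generalizing l with
  | _ len ih =>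
    cases l with
    | nil => simp [keysAsc, pvG, join_empty_nil]
    | cons x xs =>
      intro hp
      rw [List.pairwise_cons] at hp
      have hpred : (fun y => pvK y == pvK x) = (fun y => pvKey y == pvKey x) := by
        funext y; exact pvK_beq x y
      have hG : pvG "" (x :: xs) = (pvK x ++ ":" ++ pvR x) ++ pvG (pvK x) xs := by
        simp [pvG, pvK_ne_empty x]
      rw [hG, pvG_split xs (pvK x), hpred]
      set p := fun y => pvKey y == pvKey x with hpdef
      have hrs := run_split x xs hp.2 hp.1
      have hlen : (xs.dropWhile p).length < len := by
        subst hl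
        simp only [List.length_cons]
        exact Nat.lt_succ_of_le (List.length_dropWhile_le _ _)
      have hdp : (xs.dropWhile p).Pairwise (· ≤ ·) :=
        hp.2.sublist (List.dropWhile_sublist _)
      rw [ih _ hlen _ rfl hdp]
      rw [keysAsc]
      rw [List.map_cons, join_empty_cons]
      -- head block
      have hheadfilter : (x :: xs).filter (fun n => p n) = x :: xs.filter p := by
        rw [List.filter_cons_of_pos (by simp [hpdef])]
      have hhead : (pvK x ++ ":" ++ pvR x)
            ++ PySem.Str.join "" ((xs.takeWhile p).map (fun y => "," ++ pvR y))
          = (pvHdr (pvKey x) ++ ":")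
            ++ PySem.Str.join "," (((x :: xs).filter (fun n => p n)).map pvR) := by
        rw [hheadfilter, ← hrs.1, List.map_cons, join_comma_cons]
        have : ((xs.takeWhile p).map (fun t => pvR t)).map (fun t => "," ++ t)
            = (xs.takeWhile p).map (fun y => "," ++ pvR y) := by
          rw [List.map_map]; rfl
        rw [← this]
        show _ = (pvHdr (pvKey x) ++ ":") ++ (pvR x ++ _)
        apply String.toList_inj.mp
        simp [String.toList_append, pvK, pvHdr]
        rfl
      -- tail blocks: filtering over x :: xs equals filtering over the drop part
      have htail : (keysAsc (xs.dropWhile p)).map (fun k =>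
            (pvHdr k ++ ":") ++ PySem.Str.join ","
              (((xs.dropWhile p).filter (fun n => pvKey n == k)).map pvR))
          = (keysAsc (xs.dropWhile p)).map (fun k =>
            (pvHdr k ++ ":") ++ PySem.Str.join ","
              (((x :: xs).filter (fun n => pvKey n == k)).map pvR)) := by
        apply List.map_congr_left
        intro k hk
        obtain ⟨z, hz, rfl⟩ := keysAsc_sub _ _ hk
        have hxk : pvKey x < pvKey z := hrs.2 z hz
        have hfe : (x :: xs).filter (fun n => pvKey n == pvKey z)
            = (xs.dropWhile p).filter (fun n => pvKey n == pvKey z) := by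
          conv_lhs => rw [show (x :: xs)
              = (x :: xs.takeWhile p) ++ xs.dropWhile p by
            simp [List.takeWhile_append_dropWhile]]
          rw [List.filter_append]
          have hnil : (x :: xs.takeWhile p).filter (fun n => pvKey n == pvKey z) = [] := by
            rw [List.filter_eq_nil_iff]
            intro w hw
            simp only [beq_iff_eq]
            intro hc
            rcases List.mem_cons.mp hw with rfl | hw'
            · omega
            · have : pvKey w = pvKey x := by simpa [hpdef] using List.mem_takeWhile_imp hw'
              omega
          rw [hnil, List.nil_append]
        rw [hfe]
      rw [← htail]
      rw [← String.append_assoc, hhead]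

-- ---- B's buckets, characterised ----
theorem buckets_getD (s : List Int) (k : Int) :
    (s.foldl bStep PySem.Dict.empty).getD k []
      = (s.filter (fun n => pvKey n == k)).map pvRes := by
  have hfold : s.foldl bStep PySem.Dict.empty
      = (s.map (fun n => (pvKey n, pvRes n))).foldl
          (fun d p => d.modify p.1 [] (fun v => v ++ [p.2])) PySem.Dict.empty := by
    rw [List.foldl_map]
    rfl
  rw [hfold, PySem.Dict.getD_foldl_modify_append]
  rw [PySem.Dict.getD_empty, List.nil_append]
  rw [List.filter_map, List.map_map]
  rfl

theorem buckets_keys (s : List Int) :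
    (s.foldl bStep PySem.Dict.empty).keys = PySem.Set.ofList (s.map pvKey) := by
  have h := PySem.Dict.keys_foldl_modify_key (l := s) (key := pvKey) (d0 := ([] : List Int))
    (f := fun _ n => (fun v => v ++ [pvRes n])) (d := PySem.Dict.empty)
  rw [show (fun (d : PySem.Dict Int (List Int)) (n : Int) =>
      d.modify (pvKey n) [] ((fun _ n => (fun v => v ++ [pvRes n])) d n)) = bStep from rfl] at h
  rw [h, PySem.Dict.keys_empty, PySem.Set.update_nil_left]

-- ===== VERDICT (by name: the statement is the Claim_ definition above) =====
theorem MD_list_to_chimerax_spec : Claim_equal_MD_list_to_chimerax := by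
  intro s _
  unfold Spec_MD_list_to_chimerax MD_list_to_chimerax
  have hB : MD_list_to_chimerax_alt s
      = PySem.Str.join ""
          ((PySem.List.sorted (s.foldl bStep PySem.Dict.empty).keys (fun x => x) false).map
            (fun k => ("#1." ++ PySem.Int.toStr (k + 1) ++ ":") ++ PySem.Str.join ","
              ((PySem.List.sorted ((s.foldl bStep PySem.Dict.empty).getD k []) (fun x => x)
                false).map PySem.Int.toStr))) := rfl
  rw [hB]
  set L := PySem.List.sorted s (fun x => x) false with hLdef
  have hLperm : L.Perm s := PySem.List.sorted_perm s _ false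
  have hLpair : L.Pairwise (· ≤ ·) := by
    have := PySem.List.sorted_pairwise (xs := s) (key := fun x => x)
    simpa using this
  have h0 : ([] : List String) = [] → ∀ n : Int, pvK n ≠ "" := fun _ n => pvK_ne_empty n
  have hA := foldA_char L "" [] h0
  simp only [List.length_nil, Nat.cast_zero, zero_sub] at hA
  rw [hA, join_empty_nil, pvG_sorted L hLpair]
  have hkeys : PySem.List.sorted (s.foldl bStep PySem.Dict.empty).keys (fun x => x) false
      = keysAsc L := by
    rw [buckets_keys]
    apply PySem.List.sorted_eq_of_perm_of_pairwise_lt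
    · have h1 : (keysAsc L).Nodup :=
        (keysAsc_pairwise_lt L hLpair).imp (fun h => ne_of_lt h)
      have h2 : (PySem.Set.ofList (s.map pvKey)).Nodup := PySem.Set.nodup_ofList _
      rw [List.perm_ext_iff_of_nodup h1 h2]
      intro k
      rw [keysAsc_mem L hLpair, PySem.Set.mem_ofList]
      constructor
      · rintro ⟨z, hz, rfl⟩
        exact List.mem_map_of_mem (hLperm.mem_iff.mp hz)
      · intro hk
        obtain ⟨z, hz, rfl⟩ := List.mem_map.mp hk
        exact ⟨z, hLperm.mem_iff.mpr hz, rfl⟩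
    · simpa using keysAsc_pairwise_lt L hLpair
  rw [hkeys]
  have hmap : ∀ k ∈ keysAsc L,
      (pvHdr k ++ ":") ++ PySem.Str.join ","
          ((L.filter (fun n => pvKey n == k)).map pvR)
        = ("#1." ++ PySem.Int.toStr (k + 1) ++ ":") ++ PySem.Str.join ","
            ((PySem.List.sorted ((s.foldl bStep PySem.Dict.empty).getD k []) (fun x => x)
              false).map PySem.Int.toStr) := by
    intro k _
    have hbucket : PySem.List.sorted ((s.foldl bStep PySem.Dict.empty).getD k [])
          (fun x => x) false
        = (L.filter (fun n => pvKey n == k)).map pvRes := by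
      rw [buckets_getD]
      apply PySem.List.sorted_id_eq_of_perm_of_pairwise
      · exact (hLperm.filter _).map _
      · rw [List.pairwise_map]
        apply List.Pairwise.imp_of_mem (R := fun a b => a ≤ b) ?_ (hLpair.filter _)
        intro a b ha hb hab
        have hka : pvKey a = k := by simpa using (List.mem_filter.mp ha).2
        have hkb : pvKey b = k := by simpa using (List.mem_filter.mp hb).2
        exact pvRes_mono hab (hka.trans hkb.symm)
    rw [hbucket, List.map_map]
    rfl
  rw [List.map_congr_left hmap]
  simp
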